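-- pv_equiv track=rewrite | github.com/tbielak/AoC_py | sources/2015/Day01_2015.py | part_two
-- ===== SOURCE A (Python) =====
-- def part_two(input):
--     floor = 0
--     for i in range(len(input)):
--         if "(" == input[i]:
--             floor = floor + 1
--         if ")" == input[i]:
--             floor = floor - 1
--         if -1 == floor:
--             return i + 1
-- ===== SOURCE B (Python) =====
-- def part_two(input):
--     deltas = [1 if c == "(" else -1 if c == ")" else 0 for c in input]
--     sums = []
--     total = 0
--     for d in deltas:
--         total += d
--         sums.append(total)
--     for idx, v in enumerate(sums):
--         if v == -1:
--             return idx + 1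
--     return None
-- ===== Notes on version B (the rewrite author's own statement) =====
-- stated objective: idiomatic
-- what changed: B splits the fused counter loop into two phases: map characters to deltas, build the prefix-sum sequence, then search that sequence for the first -1 and return its 1-based position.
import Mathlib
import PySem

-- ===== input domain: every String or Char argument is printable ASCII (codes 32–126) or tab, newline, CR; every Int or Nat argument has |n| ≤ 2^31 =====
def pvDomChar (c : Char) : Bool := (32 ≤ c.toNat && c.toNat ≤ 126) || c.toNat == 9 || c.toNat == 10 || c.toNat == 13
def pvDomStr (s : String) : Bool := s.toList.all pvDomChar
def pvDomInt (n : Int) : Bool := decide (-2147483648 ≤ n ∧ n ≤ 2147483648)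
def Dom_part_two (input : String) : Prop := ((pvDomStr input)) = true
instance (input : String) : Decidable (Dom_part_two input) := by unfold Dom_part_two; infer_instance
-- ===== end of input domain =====

-- B separates prefix-sum construction from the search for the first -1; proved equal to A's fused counter loop.


-- ===== PORT A =====
-- A's loop over indices, carrying the running floor; returns i+1 as soon as floor hits -1.
def partTwoLoop (cs : List Char) (floor : Int) (i : Int) : Option Int :=
  match cs with
  | [] => none
  | c :: rest =>
    let f1 := if c = '(' then floor + 1 else floor
    let f2 := if c = ')' then f1 - 1 else f1
    if f2 = -1 then some (i + 1) else partTwoLoop rest f2 (i + 1)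

def part_two (input : String) : Option Int :=
  partTwoLoop input.toList 0 0

-- ===== PORT B =====
def pvDelta (c : Char) : Int := if c = '(' then 1 else if c = ')' then -1 else 0

-- the prefix-sum loop of Source B: sums of deltas, accumulated in `total`
def pvPrefixSums (ds : List Int) (total : Int) : List Int :=
  match ds with
  | [] => []
  | d :: rest => (total + d) :: pvPrefixSums rest (total + d)

-- the search loop of Source B: first 1-based position holding -1
def pvSearch (xs : List Int) (idx : Int) : Option Int :=
  match xs with
  | [] => none
  | v :: rest => if v = -1 then some (idx + 1) else pvSearch rest (idx + 1)

def part_two_alt (input : String) : Option Int :=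
  pvSearch (pvPrefixSums (input.toList.map pvDelta) 0) 0

-- ===== PRECONDITION & SPEC =====
def Spec_part_two (input : String) (out : Option Int) : Prop := out = part_two_alt input
instance (input : String) (out : Option Int) : Decidable (Spec_part_two input out) := by unfold Spec_part_two; infer_instance

-- ===== CLAIM (what is proved, stated in full; the proofs are below) =====
def Claim_equal_part_two : Prop := ∀ (input : String), Dom_part_two input → Spec_part_two input (part_two input)

-- ===== LEMMAS AND PROOFS =====
theorem pvLoop_eq (cs : List Char) (floor i : Int) :
    partTwoLoop cs floor i = pvSearch (pvPrefixSums (cs.map pvDelta) floor) i := by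
  induction cs generalizing floor i with
  | nil => rfl
  | cons c rest ih =>
    have hstep : (if c = ')' then (if c = '(' then floor + 1 else floor) - 1
                  else (if c = '(' then floor + 1 else floor)) = floor + pvDelta c := by
      unfold pvDelta; by_cases h1 : c = '(' <;> by_cases h2 : c = ')' <;>
        simp_all <;> omega
    simp only [partTwoLoop, List.map, pvPrefixSums, pvSearch, hstep]
    split
    · rfl
    · exact ih _ _

-- ===== VERDICT (by name: the statement is the Claim_ definition above) =====
theorem part_two_spec : Claim_equal_part_two := by
  intro input _
  unfold Spec_part_two part_two part_two_alt
  exact pvLoop_eq _ _ _
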